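-- pv_equiv track=rewrite | github.com/jimc66/AofC2020 | day9.py | bigandsmall
-- ===== SOURCE A (Python) =====
-- def bigandsmall(number_list, start, end):
--     """
--     bigandsmall
--     take a list of numbers, a start and end of range)
--     return the sum of the smallest and larget
--     """
--     # start with the first number being the lowest and highest
--     lowest = number_list[start]
--     highest = number_list[start]
--     for iterate in range(start, end):
--         if number_list[iterate] < lowest:
--             lowest = number_list[iterate]
--         if number_list[iterate] > highest:
--             highest = number_list[iterate]
--     ret_value = lowest + highest
--     return ret_value
-- ===== SOURCE B (Python) =====
-- def bigandsmall(number_list, start, end):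
--     candidates = [number_list[start]] + [number_list[i] for i in range(start, end)]
--     ordered = sorted(candidates)
--     return ordered[0] + ordered[-1]
-- ===== Notes on version B (the rewrite author's own statement) =====
-- stated objective: alternative
-- what changed: Replaces A's single interleaved min/max accumulator loop by building the candidate list (the start element together with the subrange), sorting it once, and summing its first and last elements.
import Mathlib
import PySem

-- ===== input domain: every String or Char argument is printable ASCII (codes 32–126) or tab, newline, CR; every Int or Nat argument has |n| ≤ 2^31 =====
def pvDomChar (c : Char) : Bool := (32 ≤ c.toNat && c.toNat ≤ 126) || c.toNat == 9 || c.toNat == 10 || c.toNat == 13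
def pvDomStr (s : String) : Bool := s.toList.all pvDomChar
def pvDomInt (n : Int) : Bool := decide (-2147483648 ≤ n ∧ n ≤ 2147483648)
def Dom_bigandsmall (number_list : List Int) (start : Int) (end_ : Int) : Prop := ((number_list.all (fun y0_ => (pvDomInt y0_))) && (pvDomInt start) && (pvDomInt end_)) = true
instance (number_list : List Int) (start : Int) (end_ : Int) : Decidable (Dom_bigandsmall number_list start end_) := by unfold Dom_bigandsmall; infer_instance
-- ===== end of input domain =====

-- B replaces A's single interleaved min/max accumulator loop with: build the candidate list (start element plus subrange), sort once, sum first+last (alternative decomposition, similar cost).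


-- ===== PORT A =====
-- Literal port of A: one fold carrying the (lowest, highest) pair over range(start, end).
def bigandsmall (number_list : List Int) (start : Int) (end_ : Int) : Int :=
  let init := PySem.List.pyGetD number_list start 0
  let p := (PySem.List.pyRange start end_ 1).foldl
    (fun (p : Int × Int) iterate =>
      (if PySem.List.pyGetD number_list iterate 0 < p.1 then PySem.List.pyGetD number_list iterate 0 else p.1,
       if PySem.List.pyGetD number_list iterate 0 > p.2 then PySem.List.pyGetD number_list iterate 0 else p.2))
    (init, init)
  p.1 + p.2

-- ===== PORT B =====
-- Port of B: candidate list = start element consed onto the mapped subrange; sort once; sum first and last.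
def bigandsmall_alt (number_list : List Int) (start : Int) (end_ : Int) : Int :=
  let candidates := PySem.List.pyGetD number_list start 0 ::
    (PySem.List.pyRange start end_ 1).map (fun i => PySem.List.pyGetD number_list i 0)
  let ordered := PySem.List.sorted candidates (fun x => x) false
  PySem.List.pyGetD ordered 0 0 + PySem.List.pyGetD ordered (-1) 0

-- ===== PRECONDITION & SPEC =====
-- Pre_: exactly the inputs where Python A returns normally (xs[start] and every
-- xs[i], i in range(start, end), are valid Python indices); elsewhere A raises IndexError.
def Pre_bigandsmall (number_list : List Int) (start : Int) (end_ : Int) : Prop :=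
  PySem.Raise.InRange number_list.length start ∧ (start < end_ → end_ ≤ number_list.length)
instance (number_list : List Int) (start : Int) (end_ : Int) : Decidable (Pre_bigandsmall number_list start end_) := by unfold Pre_bigandsmall; infer_instance
def pvWitness_bigandsmall : List Int × Int × Int := ([1, 5, 3], 0, 3)
def Spec_bigandsmall (number_list : List Int) (start : Int) (end_ : Int) (out : Int) : Prop := out = bigandsmall_alt number_list start end_
instance (number_list : List Int) (start : Int) (end_ : Int) (out : Int) : Decidable (Spec_bigandsmall number_list start end_ out) := by unfold Spec_bigandsmall; infer_instance

-- ===== CLAIM (what is proved, stated in full; the proofs are below) =====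
def Claim_equal_bigandsmall : Prop := ∀ (number_list : List Int) (start : Int) (end_ : Int), Dom_bigandsmall number_list start end_ → Pre_bigandsmall number_list start end_ → Spec_bigandsmall number_list start end_ (bigandsmall number_list start end_)

-- ===== LEMMAS AND PROOFS =====

-- A's paired fold computes (foldl min, foldl max) over the mapped values.
theorem pairfold_eq (g : Int → Int) :
    ∀ (l : List Int) (a b : Int),
      l.foldl (fun (p : Int × Int) i =>
        (if g i < p.1 then g i else p.1, if g i > p.2 then g i else p.2)) (a, b)
      = ((l.map g).foldl min a, (l.map g).foldl max b) := by
  intro l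
  induction l with
  | nil => intro a b; simp
  | cons x t ih =>
    intro a b
    simp only [List.foldl_cons, List.map_cons, ih]
    congr 1
    · congr 1; rcases lt_or_ge (g x) a with h | h <;> simp [min_def] <;> omega
    · congr 1; rcases lt_or_ge (g x) b with h | h <;> simp [max_def] <;> omega

theorem getLast_ge_of_pairwise :
    ∀ (l : List Int) (h : l ≠ []), l.Pairwise (· ≤ ·) → ∀ x ∈ l, x ≤ l.getLast h := by
  intro l
  induction l with
  | nil => intro h; exact absurd rfl h
  | cons a t ih =>
    intro _ hp x hx
    rcases t with _ | ⟨b, u⟩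
    · simp at hx; simp [hx]
    · rw [List.getLast_cons (by simp)]
      rcases List.mem_cons.mp hx with rfl | hx'
      · have ha : x ≤ b ∧ ∀ y ∈ u, x ≤ y := by
          have := (List.pairwise_cons.mp hp).1
          exact ⟨this b (by simp), fun y hy => this y (by simp [hy])⟩
        have := ih (by simp) (List.pairwise_cons.mp hp).2 b (by simp)
        calc x ≤ b := ha.1
          _ ≤ _ := this
      · exact ih (by simp) (List.pairwise_cons.mp hp).2 x hx'

theorem foldl_min_facts :
    ∀ (t : List Int) (v : Int), t.foldl min v ∈ v :: t ∧ ∀ y ∈ v :: t, t.foldl min v ≤ y := by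
  intro t
  induction t with
  | nil => intro v; simp
  | cons x t' ih =>
    intro v
    simp only [List.foldl_cons]
    obtain ⟨hmem, hle⟩ := ih (min v x)
    constructor
    · rcases min_choice v x with h | h <;>
        rcases List.mem_cons.mp hmem with h2 | h2 <;> simp_all [List.mem_cons]
    · intro y hy
      have hbase : t'.foldl min (min v x) ≤ min v x := hle _ List.mem_cons_self
      rcases List.mem_cons.mp hy with rfl | hy'
      · exact le_trans hbase (min_le_left _ _)
      · rcases List.mem_cons.mp hy' with rfl | hy''
        · exact le_trans hbase (min_le_right _ _)
        · exact hle _ (List.mem_cons_of_mem _ hy'')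

theorem foldl_max_facts :
    ∀ (t : List Int) (v : Int), t.foldl max v ∈ v :: t ∧ ∀ y ∈ v :: t, y ≤ t.foldl max v := by
  intro t
  induction t with
  | nil => intro v; simp
  | cons x t' ih =>
    intro v
    simp only [List.foldl_cons]
    obtain ⟨hmem, hle⟩ := ih (max v x)
    constructor
    · rcases max_choice v x with h | h <;>
        rcases List.mem_cons.mp hmem with h2 | h2 <;> simp_all [List.mem_cons]
    · intro y hy
      have hbase : max v x ≤ t'.foldl max (max v x) := hle _ List.mem_cons_self
      rcases List.mem_cons.mp hy with rfl | hy'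
      · exact le_trans (le_max_left _ _) hbase
      · rcases List.mem_cons.mp hy' with rfl | hy''
        · exact le_trans (le_max_right _ _) hbase
        · exact hle _ (List.mem_cons_of_mem _ hy'')

-- head of the sorted list is foldl min, last of the sorted list is foldl max
theorem sorted_head_last (v : Int) (t : List Int) :
    PySem.List.pyGetD (PySem.List.sorted (v :: t) (fun x => x) false) 0 0 = t.foldl min v ∧
    PySem.List.pyGetD (PySem.List.sorted (v :: t) (fun x => x) false) (-1) 0 = t.foldl max v := by
  set s := PySem.List.sorted (v :: t) (fun x => x) false with hs
  have hperm : s.Perm (v :: t) := PySem.List.sorted_perm _ _ _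
  have hne : s ≠ [] := by
    intro h; have := hperm.length_eq; rw [h] at this; simp at this
  obtain ⟨m, u, hmu⟩ := List.exists_cons_of_ne_nil hne
  have hsort : PySem.List.sorted (v :: t) (fun x => x) false = m :: u := by rw [← hs]; exact hmu
  have hpw : s.Pairwise (fun a b : Int => a ≤ b) := PySem.List.sorted_pairwise _ _
  obtain ⟨hminmem, hminle⟩ := foldl_min_facts t v
  obtain ⟨hmaxmem, hmaxge⟩ := foldl_max_facts t v
  have hheadle : ∀ y ∈ v :: t, m ≤ y := PySem.List.key_head_sorted_le (v :: t) (fun x => x) hsort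
  constructor
  · rw [hmu, PySem.List.pyGetD_zero_cons]
    exact le_antisymm (hheadle _ hminmem)
      (hminle m (hperm.mem_iff.mp (hmu ▸ List.mem_cons_self)))
  · rw [PySem.List.pyGetD_neg_one s 0 hne]
    refine le_antisymm (hmaxge _ (hperm.mem_iff.mp (List.getLast_mem hne))) ?_
    exact getLast_ge_of_pairwise s hne hpw _ (hperm.mem_iff.mpr hmaxmem)

-- ===== VERDICT (by name: the statement is the Claim_ definition above) =====
theorem bigandsmall_spec : Claim_equal_bigandsmall := by
  intro number_list start end_ _ _
  simp only [Spec_bigandsmall, bigandsmall, bigandsmall_alt]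
  rw [pairfold_eq (fun i => PySem.List.pyGetD number_list i 0)]
  have := sorted_head_last (PySem.List.pyGetD number_list start 0)
    ((PySem.List.pyRange start end_ 1).map (fun i => PySem.List.pyGetD number_list i 0))
  rw [this.1, this.2]
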